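-- pv_equiv track=rewrite | github.com/Blue-Pix/euler | src/50-59/problem_50.py | assume_max_length
-- ===== SOURCE A (Python) =====
-- def assume_max_length(primes):
--     _sum = 0
--     max_prime = primes[-1]
--     for index, prime in enumerate(primes):
--         _sum += prime
--         if _sum > max_prime:
--             return index
--     return len(primes) - 1
-- ===== SOURCE B (Python) =====
-- def assume_max_length(primes):
--     max_prime = primes[-1]
--     prefixes = []
--     s = 0
--     for p in primes:
--         s += p
--         prefixes.append(s)
--     ans = len(primes) - 1
--     for index, prefix in reversed(list(enumerate(prefixes))):
--         if prefix > max_prime: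
--             ans = index
--     return ans
-- ===== Notes on version B (the rewrite author's own statement) =====
-- stated objective: alternative
-- what changed: Replaces the early-exit forward scan keeping a running sum with a two-pass scheme: build the full prefix-sum table, then a reverse sweep over it where the last write (smallest exceeding index) wins.
import Mathlib
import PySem

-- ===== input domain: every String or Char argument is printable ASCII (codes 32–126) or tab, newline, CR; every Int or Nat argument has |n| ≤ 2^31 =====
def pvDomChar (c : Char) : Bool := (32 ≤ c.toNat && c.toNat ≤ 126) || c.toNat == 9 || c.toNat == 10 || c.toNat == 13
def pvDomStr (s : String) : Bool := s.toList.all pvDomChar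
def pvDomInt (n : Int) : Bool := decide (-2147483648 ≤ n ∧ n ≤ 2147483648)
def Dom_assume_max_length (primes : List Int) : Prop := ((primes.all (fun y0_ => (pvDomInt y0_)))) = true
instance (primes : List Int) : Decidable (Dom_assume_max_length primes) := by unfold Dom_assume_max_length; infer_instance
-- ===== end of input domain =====

-- B replaces the early-exit forward scan with a prefix-sum table plus a reverse sweep (alternative decomposition, same cost)


-- ===== PORT A =====
def pvGoA (m : Int) (s : Int) (i : Int) : List Int → Option Int
  | [] => none
  | p :: rest => if s + p > m then some i else pvGoA m (s + p) (i + 1) rest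

-- taking the last element raises IndexError on the empty list; Pre_ excludes it, the .getD 0 is an unused totaliser
def assume_max_length (primes : List Int) : Int :=
  let max_prime := (PySem.List.pyGet? primes (-1)).getD 0
  match pvGoA max_prime 0 0 primes with
  | some i => i
  | none => (primes.length : Int) - 1

-- ===== PORT B =====
-- prefix-sum table built in one pass (the first Python loop)
def pvPrefixes (s : Int) : List Int → List Int
  | [] => []
  | p :: rest => (s + p) :: pvPrefixes (s + p) rest

def assume_max_length_alt (primes : List Int) : Int :=
  let max_prime := (PySem.List.pyGet? primes (-1)).getD 0
  let prefixes := pvPrefixes 0 primes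
  (PySem.List.enumerate prefixes 0).reverse.foldl
    (fun ans ip => if ip.2 > max_prime then ip.1 else ans)
    ((primes.length : Int) - 1)

-- ===== PRECONDITION & SPEC =====
-- Pre_ excludes only the empty list, on which A raises IndexError when taking the last element (B raises there too)
def Pre_assume_max_length (primes : List Int) : Prop := primes ≠ []
instance (primes : List Int) : Decidable (Pre_assume_max_length primes) := by unfold Pre_assume_max_length; infer_instance
def pvWitness_assume_max_length : List Int := ([2, 3, 5, 7])
def Spec_assume_max_length (primes : List Int) (out : Int) : Prop := out = assume_max_length_alt primes
instance (primes : List Int) (out : Int) : Decidable (Spec_assume_max_length primes out) := by unfold Spec_assume_max_length; infer_instance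

-- ===== CLAIM (what is proved, stated in full; the proofs are below) =====
def Claim_equal_assume_max_length : Prop := ∀ (primes : List Int), Dom_assume_max_length primes → Pre_assume_max_length primes → Spec_assume_max_length primes (assume_max_length primes)

-- ===== LEMMAS AND PROOFS =====
-- the reverse sweep over the enumerated prefix table computes exactly A's early-exit scan
theorem pvSweep_eq_goA (m : Int) : ∀ (xs : List Int) (s k a : Int),
    (PySem.List.enumerate (pvPrefixes s xs) k).foldr
      (fun ip acc => if ip.2 > m then ip.1 else acc) a
    = (pvGoA m s k xs).getD a := by
  intro xs
  induction xs with
  | nil => intro s k a; simp [pvPrefixes, pvGoA]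
  | cons p rest ih =>
    intro s k a
    simp only [pvPrefixes, pvGoA, PySem.List.enumerate_cons, List.foldr_cons]
    split
    · simp
    · exact ih (s + p) (k + 1) a

-- ===== VERDICT (by name: the statement is the Claim_ definition above) =====
theorem assume_max_length_spec : Claim_equal_assume_max_length := by
  intro primes _ _
  unfold Spec_assume_max_length assume_max_length assume_max_length_alt
  rw [List.foldl_reverse, pvSweep_eq_goA]
  cases h : pvGoA ((PySem.List.pyGet? primes (-1)).getD 0) 0 0 primes <;> simp [h]
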